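-- pv_equiv track=rewrite | github.com/boozec/clp | progs/a725.py | max_occurrences
-- ===== SOURCE A (Python) =====
-- def max_occurrences(nums):
--     max_val = 0
--     result = nums[0]
--     for i in nums:
--         occu = nums.count(i)
--         if occu > max_val:
--             max_val = occu
--             result = i
--     return result
-- ===== SOURCE B (Python) =====
-- def max_occurrences(nums):
--     counts = {}
--     for x in nums:
--         counts[x] = counts.get(x, 0) + 1
--     result = nums[0]
--     max_val = 0
--     for k, c in counts.items():
--         if c > max_val:
--             max_val = c
--             result = k
--     return result
-- ===== Notes on version B (the rewrite author's own statement) =====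
-- stated objective: faster
-- what changed: Replaces the O(n^2) rescan (nums.count inside the loop) by a frequency dictionary built in one pass, then a scan over the distinct keys in first-occurrence order.
import Mathlib
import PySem

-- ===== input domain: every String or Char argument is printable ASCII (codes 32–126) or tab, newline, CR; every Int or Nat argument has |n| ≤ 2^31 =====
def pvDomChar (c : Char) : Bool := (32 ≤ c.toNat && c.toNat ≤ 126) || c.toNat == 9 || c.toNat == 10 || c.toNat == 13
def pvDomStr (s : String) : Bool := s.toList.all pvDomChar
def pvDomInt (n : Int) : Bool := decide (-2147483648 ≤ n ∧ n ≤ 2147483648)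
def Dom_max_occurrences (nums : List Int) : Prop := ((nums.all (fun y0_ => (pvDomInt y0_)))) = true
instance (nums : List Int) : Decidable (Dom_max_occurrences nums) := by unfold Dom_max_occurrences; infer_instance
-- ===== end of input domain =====

-- B replaces A's O(n^2) rescan (nums.count inside the loop) by a frequency dictionary
-- built in one pass, then a scan over its distinct keys in first-occurrence order (faster).

-- ===== PORT A =====
def max_occurrences (nums : List Int) : Int :=
  -- result = nums[0]; IndexError on [] is excluded by Pre_
  let result0 : Int := (PySem.List.pyGet? nums 0).getD 0
  (nums.foldl (fun (s : Int × Int) i =>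
      let occu : Int := (PySem.List.count nums i : Int)
      if occu > s.1 then (occu, i) else s) (0, result0)).2

-- ===== PORT B =====
def max_occurrences_alt (nums : List Int) : Int :=
  let counts := nums.foldl (fun (d : PySem.Dict Int Int) x => d.insert x (d.getD x 0 + 1))
      PySem.Dict.empty
  -- result = nums[0]; IndexError on [] is excluded by Pre_
  let result0 : Int := (PySem.List.pyGet? nums 0).getD 0
  (counts.items.foldl (fun (s : Int × Int) kc =>
      if kc.2 > s.1 then (kc.2, kc.1) else s) (0, result0)).2

-- ===== PRECONDITION & SPEC =====
-- Both Pythons raise IndexError (nums[0]) on the empty list; Pre_ excludes exactly that.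
def Pre_max_occurrences (nums : List Int) : Prop := nums ≠ []
instance (nums : List Int) : Decidable (Pre_max_occurrences nums) := by
  unfold Pre_max_occurrences; infer_instance
def pvWitness_max_occurrences : List Int := ([1, 2, 2])

def Spec_max_occurrences (nums : List Int) (out : Int) : Prop := out = max_occurrences_alt nums
instance (nums : List Int) (out : Int) : Decidable (Spec_max_occurrences nums out) := by
  unfold Spec_max_occurrences; infer_instance

-- ===== CLAIM (what is proved, stated in full; the proofs are below) =====
def Claim_equal_max_occurrences : Prop := ∀ (nums : List Int), Dom_max_occurrences nums → Pre_max_occurrences nums → Spec_max_occurrences nums (max_occurrences nums)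

-- ===== LEMMAS AND PROOFS =====

-- the body of A's loop (and, after List.foldl_map, of B's loop over the counter's items)
def mstep (nums : List Int) (s : Int × Int) (i : Int) : Int × Int :=
  if (PySem.List.count nums i : Int) > s.1 then ((PySem.List.count nums i : Int), i) else s

lemma prefix_foldl_add {α : Type} [BEq α] (l : List α) (seen : PySem.Set α) :
    seen <+: l.foldl PySem.Set.add seen := by
  induction l generalizing seen with
  | nil => exact List.prefix_refl _
  | cons x l ih =>
    refine List.IsPrefix.trans ?_ (ih (PySem.Set.add seen x))
    unfold PySem.Set.add
    split
    · exact List.prefix_refl _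
    · exact List.prefix_append _ _

-- duplicates never fire A's update: folding over the list equals folding over its
-- not-yet-seen distinct elements in first-occurrence order
lemma skip_seen (nums : List Int) (l : List Int) :
    ∀ (seen : PySem.Set Int) (s : Int × Int),
      (∀ x ∈ seen, (PySem.List.count nums x : Int) ≤ s.1) →
      l.foldl (mstep nums) s
        = ((l.foldl PySem.Set.add seen).drop seen.length).foldl (mstep nums) s := by
  induction l with
  | nil => intro seen s _; simp
  | cons x l ih =>
    intro seen s h
    simp only [List.foldl_cons]
    by_cases hx : x ∈ seen
    · have hadd : PySem.Set.add seen x = seen := by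
        simp [PySem.Set.add, PySem.Set.contains, hx]
      have hstep : mstep nums s x = s := by
        have := h x hx
        simp only [mstep]
        rw [if_neg (by omega)]
      rw [hadd, hstep]
      exact ih seen s h
    · have hadd : PySem.Set.add seen x = seen ++ [x] := by
        simp [PySem.Set.add, PySem.Set.contains, hx]
      set s' := mstep nums s x with hs'
      have hub : s.1 ≤ s'.1 ∧ (PySem.List.count nums x : Int) ≤ s'.1 := by
        rw [hs']; unfold mstep; split <;> refine ⟨?_, ?_⟩ <;> dsimp only <;> omega
      have h' : ∀ y ∈ seen ++ [x], (PySem.List.count nums y : Int) ≤ s'.1 := by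
        intro y hy
        rcases List.mem_append.mp hy with hy | hy
        · exact le_trans (h y hy) hub.1
        · simp only [List.mem_singleton] at hy
          subst hy; exact hub.2
      obtain ⟨t, ht⟩ := prefix_foldl_add l (seen ++ [x])
      have hdrop1 : (l.foldl PySem.Set.add (seen ++ [x])).drop seen.length = x :: t := by
        rw [← ht, List.append_assoc, List.drop_left]
        rfl
      have hdrop2 : (l.foldl PySem.Set.add (seen ++ [x])).drop (seen ++ [x]).length = t := by
        rw [← ht, List.drop_left]
      have := ih (seen ++ [x]) s' h'
      rw [hadd, this, hdrop1, hdrop2]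
      rfl

-- ===== VERDICT (by name: the statement is the Claim_ definition above) =====
theorem max_occurrences_spec : Claim_equal_max_occurrences := by
  intro nums _ _
  unfold Spec_max_occurrences max_occurrences max_occurrences_alt
  simp only [PySem.Dict.foldl_insert_getD_add_one_eq_counter, PySem.Dict.items_counter,
    List.foldl_map]
  have hA : nums.foldl (fun (s : Int × Int) i =>
        let occu : Int := (PySem.List.count nums i : Int)
        if occu > s.1 then (occu, i) else s) (0, (PySem.List.pyGet? nums 0).getD 0)
      = nums.foldl (mstep nums) (0, (PySem.List.pyGet? nums 0).getD 0) := rfl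
  have hB : (PySem.Set.ofList nums).foldl
        (fun (s : Int × Int) k => if ((List.count k nums : Int)) > s.1
          then ((List.count k nums : Int), k) else s)
        (0, (PySem.List.pyGet? nums 0).getD 0)
      = (PySem.Set.ofList nums).foldl (mstep nums) (0, (PySem.List.pyGet? nums 0).getD 0) := by
    apply PySem.List.foldl_congr_mem
    intro acc x _
    simp [mstep, PySem.List.count]
  have hskip := skip_seen nums nums [] (0, (PySem.List.pyGet? nums 0).getD 0)
    (by intro x hx; simp at hx)
  rw [hA, hskip]
  simp only [List.length_nil, List.drop_zero]
  rw [← PySem.Set.ofList_eq_foldl]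
  exact congrArg Prod.snd hB.symm
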